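-- pv_equiv track=rewrite | github.com/dhananjay09892/Career-Resources | DSA/2dArray.py | traversalDfs
-- ===== SOURCE A (Python) =====
-- def traversalDfs(arr):
--     rows = len(arr)
--     cols = len(arr[0]) if rows > 0 else 0
--     visited = [[False for _ in range(cols)] for _ in range(rows)]
--     result = []
--     direction = [[-1,0],[0,1],[1,0],[0,-1]]
--
--     def dfs(r, c):
--         if r < 0 or r >= rows or c < 0 or c >= cols or visited[r][c]:
--             return
--         visited[r][c] = True
--         result.append(arr[r][c])
--         for dr, dc in direction:
--             nr, nc = r + dr, c + dc
--             dfs(nr, nc)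
--
--     dfs(0, 0)
--     return result
-- ===== SOURCE B (Python) =====
-- def traversalDfs(arr):
--     rows = len(arr)
--     cols = len(arr[0]) if rows > 0 else 0
--     visited = [[False for _ in range(cols)] for _ in range(rows)]
--     result = []
--     stack = [(0, 0)]
--     while stack:
--         r, c = stack.pop()
--         if r < 0 or r >= rows or c < 0 or c >= cols or visited[r][c]:
--             continue
--         visited[r][c] = True
--         result.append(arr[r][c])
--         # push the four neighbours in reverse, so they pop in the
--         # recursive order up, right, down, left
--         for dr, dc in ([0, -1], [1, 0], [0, 1], [-1, 0]):
--             stack.append((r + dr, c + dc))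
--     return result
-- ===== Notes on version B (the rewrite author's own statement) =====
-- stated objective: alternative
-- what changed: Replaces the recursive nested dfs closure (mutating outer visited/result, Python recursion-depth bound) by an iterative explicit-stack loop that checks/marks cells on pop and pushes the four neighbours in reverse order, producing the identical pre-order without recursion.
import Mathlib
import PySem

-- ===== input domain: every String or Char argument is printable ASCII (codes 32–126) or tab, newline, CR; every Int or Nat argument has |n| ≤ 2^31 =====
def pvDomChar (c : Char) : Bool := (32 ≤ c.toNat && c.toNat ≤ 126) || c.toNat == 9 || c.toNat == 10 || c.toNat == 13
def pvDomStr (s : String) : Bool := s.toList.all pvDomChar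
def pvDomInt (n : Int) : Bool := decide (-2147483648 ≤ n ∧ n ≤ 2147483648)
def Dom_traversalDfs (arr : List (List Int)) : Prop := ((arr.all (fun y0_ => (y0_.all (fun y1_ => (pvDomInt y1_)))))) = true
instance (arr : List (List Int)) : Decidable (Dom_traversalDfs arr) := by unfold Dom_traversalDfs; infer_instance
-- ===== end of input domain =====

-- B re-implements the recursive DFS as an iterative explicit-stack loop (same visit order); the proof shows the stack run simulates the recursion.

-- shared literal helpers for both ports (Python expressions visited[r][c], visited[r][c]=True, arr[r][c])
-- visited[r][c]; the default `true` is only read for indices outside the visited matrix,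
-- which the ports never reach from their entry (guards r<rows, c<cols hold first); it makes termination provable.
def pvVisGet (v : List (List Bool)) (r c : Int) : Bool :=
  (v.getD r.toNat []).getD c.toNat true
-- visited[r][c] = True
def pvVisSet (v : List (List Bool)) (r c : Int) : List (List Bool) :=
  v.set r.toNat ((v.getD r.toNat []).set c.toNat true)
-- arr[r][c]; only evaluated with indices in range under Pre_ (guards give 0 ≤ r < rows, 0 ≤ c < cols)
def pvCellGet (arr : List (List Int)) (r c : Int) : Int :=
  (arr.getD r.toNat []).getD c.toNat 0
-- number of unvisited cells: the termination measure
def pvFalseCnt (v : List (List Bool)) : Nat :=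
  (v.map (List.count false)).sum

-- marking a genuinely unvisited cell strictly decreases the number of unvisited cells
-- (needed by the WF recursion of port B, so it stays above the ports)
theorem pvCount_set_true_lt (row : List Bool) (j : Nat) (h : row.getD j true = false) :
    (row.set j true).count false < row.count false := by
  induction row generalizing j with
  | nil => simp [List.getD] at h
  | cons b t ih =>
    cases j with
    | zero =>
      simp only [List.getD_cons_zero] at h
      subst h
      simp [List.set]
    | succ j =>
      simp only [List.getD_cons_succ] at h
      have := ih j h
      simp only [List.set, List.count_cons]
      cases b <;> simp <;> omega

theorem pvFalseCnt_set_lt (v : List (List Bool)) (r c : Int)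
    (h : pvVisGet v r c = false) : pvFalseCnt (pvVisSet v r c) < pvFalseCnt v := by
  unfold pvVisGet at h
  unfold pvVisSet pvFalseCnt
  induction v generalizing r with
  | nil => simp [List.getD] at h
  | cons row t ih =>
    by_cases hr : r.toNat = 0
    · simp only [hr, List.getD_cons_zero] at h
      simp only [hr, List.set, List.getD_cons_zero, List.map_cons, List.sum_cons]
      have := pvCount_set_true_lt row c.toNat h
      omega
    · obtain ⟨k, hk⟩ : ∃ k, r.toNat = k + 1 := ⟨r.toNat - 1, by omega⟩
      simp only [hk, List.getD_cons_succ] at h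
      have := ih (r := (k : Int)) (by simpa using h)
      simp only [hk, List.set, List.map_cons, List.sum_cons]
      simpa using this

-- ===== PORT A =====
-- the recursive closure dfs(r, c); state (visited, result) is threaded explicitly; the
-- fuel argument only makes the recursion structural and never runs out from the entry point
def pvDfsA (arr : List (List Int)) (rows cols : Int) :
    Nat → List (List Bool) → List Int → Int → Int → List (List Bool) × List Int
  | 0, v, res, _, _ => (v, res)
  | n + 1, v, res, r, c =>
    if r < 0 || rows ≤ r || c < 0 || cols ≤ c || pvVisGet v r c then (v, res)
    else
      let v' := pvVisSet v r c
      let res' := res ++ [pvCellGet arr r c]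
      [((-1 : Int), (0 : Int)), (0, 1), (1, 0), (0, -1)].foldl
        (fun s d => pvDfsA arr rows cols n s.1 s.2 (r + d.1) (c + d.2)) (v', res')

def traversalDfs (arr : List (List Int)) : List Int :=
  let rows : Int := arr.length
  let cols : Int := if (0 : Int) < rows then ((arr.headD []).length : Int) else 0
  let visited := List.replicate arr.length (List.replicate (arr.headD []).length false)
  (pvDfsA arr rows cols (arr.length * (arr.headD []).length + 1) visited [] 0 0).2

-- ===== PORT B =====
-- while stack: pop (r,c); skip or mark+append and push the 4 neighbours in reverse push
-- order [0,-1],[1,0],[0,1],[-1,0] (Python appends to the end and pops the end, so with the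
-- Lean list head as top of stack each append is a cons; the unrolled pushes give the cons chain)
def pvRunB (arr : List (List Int)) (rows cols : Int) :
    List (List Bool) → List Int → List (Int × Int) → List (List Bool) × List Int
  | v, res, [] => (v, res)
  | v, res, (r, c) :: rest =>
    if h : (r < 0 || rows ≤ r || c < 0 || cols ≤ c || pvVisGet v r c) = true then
      pvRunB arr rows cols v res rest
    else
      pvRunB arr rows cols (pvVisSet v r c) (res ++ [pvCellGet arr r c])
        ((r - 1, c) :: (r, c + 1) :: (r + 1, c) :: (r, c - 1) :: rest)
  termination_by v _ stack => (pvFalseCnt v, stack.length)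
  decreasing_by
  · exact Prod.Lex.right _ (by simp)
  · exact Prod.Lex.left _ _ (pvFalseCnt_set_lt v r c (by
      simp only [Bool.or_eq_true, decide_eq_true_eq, not_or, Bool.not_eq_true] at h
      exact h.right))

def traversalDfs_alt (arr : List (List Int)) : List Int :=
  let rows : Int := arr.length
  let cols : Int := if (0 : Int) < rows then ((arr.headD []).length : Int) else 0
  let visited := List.replicate arr.length (List.replicate (arr.headD []).length false)
  (pvRunB arr rows cols visited [] [(0, 0)]).2

-- ===== PRECONDITION & SPEC =====
-- Pre_ excludes exactly the ragged grids on which A raises IndexError: some row shorter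
-- than the first row, whose length A takes as the column count (every cell is visited).
def Pre_traversalDfs (arr : List (List Int)) : Prop :=
  ∀ row ∈ arr, (arr.headD []).length ≤ row.length
instance (arr : List (List Int)) : Decidable (Pre_traversalDfs arr) := by
  unfold Pre_traversalDfs; infer_instance
def pvWitness_traversalDfs : List (List Int) := [[1, 2, 3], [4, 5, 6]]
def Spec_traversalDfs (arr : List (List Int)) (out : List Int) : Prop := out = traversalDfs_alt arr
instance (arr : List (List Int)) (out : List Int) : Decidable (Spec_traversalDfs arr out) := by unfold Spec_traversalDfs; infer_instance

-- ===== CLAIM (what is proved, stated in full; the proofs are below) =====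
def Claim_equal_traversalDfs : Prop := ∀ (arr : List (List Int)), Dom_traversalDfs arr → Pre_traversalDfs arr → Spec_traversalDfs arr (traversalDfs arr)

-- ===== LEMMAS AND PROOFS =====

-- the recursion never increases the number of unvisited cells
theorem pvDfsA_cnt_le (arr : List (List Int)) (rows cols : Int) (n : Nat) :
    ∀ v res r c, pvFalseCnt (pvDfsA arr rows cols n v res r c).1 ≤ pvFalseCnt v := by
  induction n with
  | zero => intro v res r c; simp [pvDfsA]
  | succ n ih =>
    intro v res r c
    simp only [pvDfsA, List.foldl]
    split
    · exact le_rfl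
    · rename_i h
      have hvg : pvVisGet v r c = false := by
        simp only [Bool.or_eq_true, decide_eq_true_eq, not_or, Bool.not_eq_true] at h
        exact h.right
      have h0 : pvFalseCnt (pvVisSet v r c) ≤ pvFalseCnt v :=
        le_of_lt (pvFalseCnt_set_lt v r c hvg)
      exact ((ih _ _ _ _).trans ((ih _ _ _ _).trans ((ih _ _ _ _).trans ((ih _ _ _ _).trans h0))))
theorem pvBridge (arr : List (List Int)) (rows cols : Int) :
    ∀ k v, pvFalseCnt v ≤ k → ∀ res r c rest n, pvFalseCnt v < n →
      pvRunB arr rows cols v res ((r, c) :: rest)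
        = pvRunB arr rows cols (pvDfsA arr rows cols n v res r c).1
            (pvDfsA arr rows cols n v res r c).2 rest := by
  intro k
  induction k with
  | zero =>
    intro v hv res r c rest n hn
    obtain ⟨m, rfl⟩ : ∃ m, n = m + 1 := ⟨n - 1, by omega⟩
    by_cases hc : (r < 0 || rows ≤ r || c < 0 || cols ≤ c || pvVisGet v r c) = true
    · rw [pvRunB.eq_2, dif_pos hc, pvDfsA.eq_2, if_pos hc]
    · exfalso
      have hvg : pvVisGet v r c = false := by
        simp only [Bool.or_eq_true, decide_eq_true_eq, not_or, Bool.not_eq_true] at hc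
        exact hc.right
      have := pvFalseCnt_set_lt v r c hvg
      omega
  | succ k ih =>
    intro v hv res r c rest n hn
    obtain ⟨m, rfl⟩ : ∃ m, n = m + 1 := ⟨n - 1, by omega⟩
    by_cases hc : (r < 0 || rows ≤ r || c < 0 || cols ≤ c || pvVisGet v r c) = true
    · rw [pvRunB.eq_2, dif_pos hc, pvDfsA.eq_2, if_pos hc]
    · have hvg : pvVisGet v r c = false := by
        simp only [Bool.or_eq_true, decide_eq_true_eq, not_or, Bool.not_eq_true] at hc
        exact hc.right
      have hset := pvFalseCnt_set_lt v r c hvg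
      rw [pvRunB.eq_2, dif_neg hc, pvDfsA.eq_2, if_neg hc]
      simp only [List.foldl, add_zero, ← sub_eq_add_neg]
      set st0v := pvVisSet v r c with hst0v
      set st0r := res ++ [pvCellGet arr r c] with hst0r
      rw [ih st0v (by omega) st0r (r - 1) c _ m (by omega)]
      set s1 := pvDfsA arr rows cols m st0v st0r (r - 1) c with hs1
      have m1 : pvFalseCnt s1.1 ≤ pvFalseCnt st0v := pvDfsA_cnt_le arr rows cols m st0v st0r (r - 1) c
      rw [ih s1.1 (by omega) s1.2 r (c + 1) _ m (by omega)]
      set s2 := pvDfsA arr rows cols m s1.1 s1.2 r (c + 1) with hs2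
      have m2 : pvFalseCnt s2.1 ≤ pvFalseCnt s1.1 := pvDfsA_cnt_le arr rows cols m s1.1 s1.2 r (c + 1)
      rw [ih s2.1 (by omega) s2.2 (r + 1) c _ m (by omega)]
      set s3 := pvDfsA arr rows cols m s2.1 s2.2 (r + 1) c with hs3
      have m3 : pvFalseCnt s3.1 ≤ pvFalseCnt s2.1 := pvDfsA_cnt_le arr rows cols m s2.1 s2.2 (r + 1) c
      rw [ih s3.1 (by omega) s3.2 r (c - 1) _ m (by omega)]

-- the stack run simulates one recursive call on the top of the stack (see pvBridge above)
theorem pvFalseCnt_replicate (a b : Nat) :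
    pvFalseCnt (List.replicate a (List.replicate b false)) = a * b := by
  induction a with
  | zero => simp [pvFalseCnt]
  | succ a ih =>
    simp only [List.replicate_succ, pvFalseCnt, List.map_cons, List.sum_cons] at *
    simp [Nat.succ_mul, Nat.add_comm]

-- ===== VERDICT (by name: the statement is the Claim_ definition above) =====
theorem traversalDfs_spec : Claim_equal_traversalDfs := by
  intro arr _ _
  simp only [Spec_traversalDfs, traversalDfs, traversalDfs_alt]
  have hcnt := pvFalseCnt_replicate arr.length (arr.headD []).length
  rw [pvBridge arr _ _ (pvFalseCnt (List.replicate arr.length (List.replicate (arr.headD []).length false))) _ le_rfl [] 0 0 [] (arr.length * (arr.headD []).length + 1) (by omega)]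
  simp [pvRunB]
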